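-- pv_equiv track=rewrite | github.com/anindyaroypiyal/DSAPractice | 2dArray/2.py | isMatrixSymmetric
-- ===== SOURCE A (Python) =====
-- def isMatrixSymmetric(matrix):
--     # Write your code here.
--     row = len(matrix)
--     col = row
--
--     for i in range(row):
--         for j in range(col):
--             if matrix[i][j] != matrix[j][i]:
--                 return False
--
--     return True
-- ===== SOURCE B (Python) =====
-- def isMatrixSymmetric(matrix):
--     n = len(matrix)
--     # a matrix with a row shorter than n cannot be symmetric
--     if any(len(row) < n for row in matrix):
--         return False
--     # build the n*n block and its transpose, compare with one list equality
--     block = [[matrix[i][j] for j in range(n)] for i in range(n)]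
--     transpose = [[matrix[j][i] for j in range(n)] for i in range(n)]
--     return block == transpose
-- ===== Notes on version B (the rewrite author's own statement) =====
-- stated objective: alternative
-- what changed: B rejects matrices with a row shorter than n up front, then materialises the n*n block and its transpose and returns one list equality (build-then-compare), instead of A's nested index scan with an early return at the first mismatched pair.
import Mathlib
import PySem

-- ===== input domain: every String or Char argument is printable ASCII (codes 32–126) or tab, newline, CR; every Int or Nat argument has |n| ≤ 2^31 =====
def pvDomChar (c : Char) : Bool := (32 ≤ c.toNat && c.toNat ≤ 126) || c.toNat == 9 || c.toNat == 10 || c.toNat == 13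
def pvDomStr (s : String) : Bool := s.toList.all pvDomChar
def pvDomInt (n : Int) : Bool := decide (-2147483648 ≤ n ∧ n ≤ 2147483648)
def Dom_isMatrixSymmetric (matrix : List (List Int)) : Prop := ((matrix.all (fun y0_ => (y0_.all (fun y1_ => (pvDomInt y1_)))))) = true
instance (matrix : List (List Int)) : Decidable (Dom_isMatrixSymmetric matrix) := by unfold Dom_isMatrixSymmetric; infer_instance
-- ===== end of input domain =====

-- B rejects short-row matrices up front, then builds the n×n block and its transpose and compares them
-- with one list equality; A scans index pairs with an early return.

-- ===== PORT A =====
-- inner 'for j in range(col): if matrix[i][j] != matrix[j][i]: return False'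
def pvInnerA (m : List (List Int)) (i : Int) : List Int → Bool
  | [] => true
  | j :: js =>
    if PySem.List.pyGetD (PySem.List.pyGetD m i []) j 0 ≠ PySem.List.pyGetD (PySem.List.pyGetD m j []) i 0
    then false
    else pvInnerA m i js

-- outer 'for i in range(row)'
def pvOuterA (m : List (List Int)) (col : Int) : List Int → Bool
  | [] => true
  | i :: is =>
    if pvInnerA m i (PySem.List.pyRange 0 col 1) then pvOuterA m col is else false

def isMatrixSymmetric (matrix : List (List Int)) : Bool :=
  let row : Int := matrix.length
  let col : Int := row
  pvOuterA matrix col (PySem.List.pyRange 0 row 1)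

-- ===== PORT B =====
-- if any(len(row) < n for row in matrix): return False
-- block = [[matrix[i][j] for j in range(n)] for i in range(n)]
-- transpose = [[matrix[j][i] for j in range(n)] for i in range(n)]
-- return block == transpose
def isMatrixSymmetric_alt (matrix : List (List Int)) : Bool :=
  let n : Int := matrix.length
  if matrix.any (fun row => decide ((row.length : Int) < n)) then false
  else
    let block := (PySem.List.pyRange 0 n 1).map (fun i =>
      (PySem.List.pyRange 0 n 1).map (fun j => PySem.List.pyGetD (PySem.List.pyGetD matrix i []) j 0))
    let transpose := (PySem.List.pyRange 0 n 1).map (fun i =>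
      (PySem.List.pyRange 0 n 1).map (fun j => PySem.List.pyGetD (PySem.List.pyGetD matrix j []) i 0))
    block == transpose

-- ===== PRECONDITION & SPEC =====
-- Pre_ excludes exactly the inputs on which A raises IndexError: it holds iff either every access of the
-- n×n scan is in range (all rows at least n long), or some in-range mismatch is reached before any
-- out-of-range access (so A returns False); on every other input A raises before returning.
def Pre_isMatrixSymmetric (matrix : List (List Int)) : Prop :=
  (∀ r ∈ matrix, matrix.length ≤ r.length) ∨
  (∃ i < matrix.length, ∃ j < matrix.length,
    j < (matrix.getD i []).length ∧ i < (matrix.getD j []).length ∧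
    (matrix.getD i []).getD j 0 ≠ (matrix.getD j []).getD i 0 ∧
    ∀ i' < matrix.length, ∀ j' < matrix.length, (i' < i ∨ (i' = i ∧ j' < j)) →
      j' < (matrix.getD i' []).length ∧ i' < (matrix.getD j' []).length)
instance (matrix : List (List Int)) : Decidable (Pre_isMatrixSymmetric matrix) := by unfold Pre_isMatrixSymmetric; infer_instance

def pvWitness_isMatrixSymmetric : List (List Int) := [[1, 2], [2, 5]]

def Spec_isMatrixSymmetric (matrix : List (List Int)) (out : Bool) : Prop := out = isMatrixSymmetric_alt matrix
instance (matrix : List (List Int)) (out : Bool) : Decidable (Spec_isMatrixSymmetric matrix out) := by unfold Spec_isMatrixSymmetric; infer_instance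

-- ===== CLAIM (what is proved, stated in full; the proofs are below) =====
def Claim_equal_isMatrixSymmetric : Prop := ∀ (matrix : List (List Int)), Dom_isMatrixSymmetric matrix → Pre_isMatrixSymmetric matrix → Spec_isMatrixSymmetric matrix (isMatrixSymmetric matrix)

-- ===== LEMMAS AND PROOFS =====

-- the (default-completed) entry both ports read at (i, j)
def pvAcc (m : List (List Int)) (i j : Nat) : Int := (m.getD i []).getD j 0

-- the symmetry property both ports decide
def pvSym (m : List (List Int)) : Prop :=
  ∀ i < m.length, ∀ j < m.length, pvAcc m i j = pvAcc m j i

lemma pvInnerA_all (m : List (List Int)) (i : Int) (js : List Int) :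
    pvInnerA m i js =
      js.all (fun j => decide (PySem.List.pyGetD (PySem.List.pyGetD m i []) j 0 = PySem.List.pyGetD (PySem.List.pyGetD m j []) i 0)) := by
  induction js with
  | nil => rfl
  | cons j js ih => simp [pvInnerA, ih]

lemma pvOuterA_all (m : List (List Int)) (col : Int) (is : List Int) :
    pvOuterA m col is = is.all (fun i => pvInnerA m i (PySem.List.pyRange 0 col 1)) := by
  induction is with
  | nil => rfl
  | cons i is ih =>
    simp only [pvOuterA, ih, List.all_cons]
    split_ifs with h <;> simp [h]

lemma pvGetD_int (m : List (List Int)) (i j : Int) (hi : 0 ≤ i) (hj : 0 ≤ j) :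
    PySem.List.pyGetD (PySem.List.pyGetD m i []) j 0 = pvAcc m i.toNat j.toNat := by
  unfold pvAcc
  rcases Int.eq_ofNat_of_zero_le hi with ⟨a, rfl⟩
  rcases Int.eq_ofNat_of_zero_le hj with ⟨b, rfl⟩
  simp [PySem.List.pyGetD_natCast]

lemma portA_iff (m : List (List Int)) : isMatrixSymmetric m = true ↔ pvSym m := by
  unfold isMatrixSymmetric pvSym
  simp only [pvOuterA_all, pvInnerA_all, List.all_eq_true]
  constructor
  · intro h i hi j hj
    have := h (i : Int) (by rw [PySem.List.mem_pyRange_one]; omega) (j : Int)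
      (by rw [PySem.List.mem_pyRange_one]; omega)
    rw [pvGetD_int m i j (by omega) (by omega), pvGetD_int m j i (by omega) (by omega)] at this
    simpa using this
  · intro h i hi j hj
    rw [PySem.List.mem_pyRange_one] at hi hj
    rw [pvGetD_int m i j (by omega) (by omega), pvGetD_int m j i (by omega) (by omega)]
    simp only [decide_eq_true_eq]
    exact h i.toNat (by omega) j.toNat (by omega)

-- B's build-then-compare core decides the same symmetry property
lemma portB_core_iff (m : List (List Int)) :
    ((PySem.List.pyRange 0 (m.length : Int) 1).map (fun i =>
      (PySem.List.pyRange 0 (m.length : Int) 1).map (fun j => PySem.List.pyGetD (PySem.List.pyGetD m i []) j 0)) ==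
     (PySem.List.pyRange 0 (m.length : Int) 1).map (fun i =>
      (PySem.List.pyRange 0 (m.length : Int) 1).map (fun j => PySem.List.pyGetD (PySem.List.pyGetD m j []) i 0))) = true
    ↔ pvSym m := by
  unfold pvSym
  simp only [beq_iff_eq, List.map_inj_left]
  constructor
  · intro h i hi j hj
    have := h (i : Int) (by rw [PySem.List.mem_pyRange_one]; omega) (j : Int)
      (by rw [PySem.List.mem_pyRange_one]; omega)
    rw [pvGetD_int m i j (by omega) (by omega), pvGetD_int m j i (by omega) (by omega)] at this
    simpa using this
  · intro h i hi j hj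
    rw [PySem.List.mem_pyRange_one] at hi hj
    rw [pvGetD_int m i j (by omega) (by omega), pvGetD_int m j i (by omega) (by omega)]
    exact h i.toNat (by omega) j.toNat (by omega)

-- on a matrix with a short row inside Pre_, an in-range mismatch exists, so symmetry fails
lemma ports_agree (m : List (List Int)) (hpre : Pre_isMatrixSymmetric m) :
    isMatrixSymmetric m = isMatrixSymmetric_alt m := by
  unfold isMatrixSymmetric_alt
  simp only
  split_ifs with hg
  · -- some row is shorter than n: Pre_'s first disjunct fails, take the mismatch witness
    rw [List.any_eq_true] at hg
    obtain ⟨r, hr, hlt⟩ := hg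
    have hshort : ¬ (∀ r ∈ m, m.length ≤ r.length) := by
      intro hall
      have := hall r hr
      simp at hlt
      omega
    rcases hpre with h | ⟨i, hi, j, hj, hjr, hir, hne, _⟩
    · exact absurd h hshort
    · have : ¬ pvSym m := by
        intro hs
        exact hne (hs i hi j hj)
      rw [← portA_iff] at this
      simpa using this
  · rw [Bool.eq_iff_iff, portA_iff, portB_core_iff]

-- ===== VERDICT (by name: the statement is the Claim_ definition above) =====
theorem isMatrixSymmetric_spec : Claim_equal_isMatrixSymmetric := by
  intro m _ hpre
  exact ports_agree m hpre
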